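-- pv_equiv track=rewrite | github.com/Dwittyy/AdventOfCode | Day 10/Day 10b.py | FindNecessary
-- ===== SOURCE A (Python) =====
-- def FindNecessary(adapters):
--     adapters.sort()
--     necessary = [adapters[0],adapters[-1]]
--     for i in range(1,len(adapters)-1):
--         if adapters[i] == adapters[i+1] - 3:
--             necessary.append(adapters[i])
--             continue
--         if adapters[i] == adapters[i-1] + 3:
--             necessary.append(adapters[i])
--             continue
--     necessary.sort()
--     return necessary
-- ===== SOURCE B (Python) =====
-- def FindNecessary(adapters):
--     adapters.sort()
--     # split the sorted list into maximal runs: a new run starts at every 3-gap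
--     segs = [[adapters[0]]]
--     for cur in adapters[1:]:
--         if cur - segs[-1][-1] == 3:
--             segs.append([cur])
--         else:
--             segs[-1].append(cur)
--     # necessary = the two endpoints plus every run border that is an interior element
--     necessary = [adapters[0], adapters[-1]]
--     last = len(segs) - 1
--     for k, seg in enumerate(segs):
--         if len(seg) == 1:
--             if 0 < k < last:
--                 necessary.append(seg[0])
--         else:
--             if k > 0:
--                 necessary.append(seg[0])
--             if k < last:
--                 necessary.append(seg[-1])
--     necessary.sort()
--     return necessary
-- ===== Notes on version B (the rewrite author's own statement) =====
-- stated objective: alternative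
-- what changed: B splits the sorted list into maximal runs separated by 3-gaps (a list-of-segments structure built in one pass) and then emits each run's border elements with first/last-run exclusions, instead of A's per-index dual-neighbour arithmetic test.
-- outside the precondition, e.g. on FindNecessary([]): A raises IndexError, B raises IndexError
import Mathlib
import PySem

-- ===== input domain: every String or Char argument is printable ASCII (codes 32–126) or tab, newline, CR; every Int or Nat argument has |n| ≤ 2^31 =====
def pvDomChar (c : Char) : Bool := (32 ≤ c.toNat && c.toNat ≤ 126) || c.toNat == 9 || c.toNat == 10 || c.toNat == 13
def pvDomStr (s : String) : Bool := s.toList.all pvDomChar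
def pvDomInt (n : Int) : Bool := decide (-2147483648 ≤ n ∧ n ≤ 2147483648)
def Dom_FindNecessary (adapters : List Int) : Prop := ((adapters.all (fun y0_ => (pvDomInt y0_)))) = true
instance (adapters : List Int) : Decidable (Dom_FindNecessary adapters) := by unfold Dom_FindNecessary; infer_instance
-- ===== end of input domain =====

-- B replaces A's per-index dual-neighbour test by splitting the sorted list into maximal
-- runs at the 3-gaps and emitting each run's border elements (alternative decomposition,
-- same cost). Both A and B sort the argument list in place; the equivalence proved here
-- is about the RETURN value.

-- ===== PORT A =====
def FindNecessary (adapters : List Int) : List Int :=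
  let a := PySem.List.sorted adapters (fun x => x) false
  let necessary := (PySem.List.pyRange 1 ((a.length : Int) - 1) 1).foldl
    (fun acc i =>
      if (PySem.List.pyGet? a i).getD 0 = (PySem.List.pyGet? a (i + 1)).getD 0 - 3 then
        acc ++ [(PySem.List.pyGet? a i).getD 0]
      else if (PySem.List.pyGet? a i).getD 0 = (PySem.List.pyGet? a (i - 1)).getD 0 + 3 then
        acc ++ [(PySem.List.pyGet? a i).getD 0]
      else acc)
    [(PySem.List.pyGet? a 0).getD 0, (PySem.List.pyGet? a (-1)).getD 0]
  PySem.List.sorted necessary (fun x => x) false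

-- ===== PORT B =====
def FindNecessary_alt (adapters : List Int) : List Int :=
  let a := PySem.List.sorted adapters (fun x => x) false
  -- segs = [[a[0]]]; for cur in a[1:]: new run at a 3-gap, else append to the last run
  let segs := (PySem.List.slice a (some 1) none).foldl
    (fun segs cur =>
      if cur - (PySem.List.pyGet? ((PySem.List.pyGet? segs (-1)).getD []) (-1)).getD 0 = 3 then
        segs ++ [[cur]]
      else
        segs.dropLast ++ [((PySem.List.pyGet? segs (-1)).getD []) ++ [cur]])
    [[(PySem.List.pyGet? a 0).getD 0]]
  let last : Int := (segs.length : Int) - 1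
  let necessary := (PySem.List.enumerate segs 0).foldl
    (fun acc ks =>
      if ks.2.length = 1 then
        (if 0 < ks.1 ∧ ks.1 < last then acc ++ [(PySem.List.pyGet? ks.2 0).getD 0] else acc)
      else
        (let acc2 := if 0 < ks.1 then acc ++ [(PySem.List.pyGet? ks.2 0).getD 0] else acc
         if ks.1 < last then acc2 ++ [(PySem.List.pyGet? ks.2 (-1)).getD 0] else acc2))
    [(PySem.List.pyGet? a 0).getD 0, (PySem.List.pyGet? a (-1)).getD 0]
  PySem.List.sorted necessary (fun x => x) false

-- ===== PRECONDITION & SPEC =====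
-- Pre_ excludes the empty list, on which the Python A raises IndexError when it indexes the first element.
def Pre_FindNecessary (adapters : List Int) : Prop := adapters ≠ []
instance (adapters : List Int) : Decidable (Pre_FindNecessary adapters) := by unfold Pre_FindNecessary; infer_instance
def pvWitness_FindNecessary : List Int := [1, 4]
def Spec_FindNecessary (adapters : List Int) (out : List Int) : Prop := out = FindNecessary_alt adapters
instance (adapters : List Int) (out : List Int) : Decidable (Spec_FindNecessary adapters out) := by unfold Spec_FindNecessary; infer_instance

-- ===== CLAIM (what is proved, stated in full; the proofs are below) =====
def Claim_equal_FindNecessary : Prop := ∀ (adapters : List Int), Dom_FindNecessary adapters → Pre_FindNecessary adapters → Spec_FindNecessary adapters (FindNecessary adapters)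

-- ===== LEMMAS AND PROOFS =====

-- interior elements appended by A, structurally: p is the previous element, the stream is the rest
def midsA : Int → List Int → List Int
  | p, m :: n :: rest => (if m = n - 3 ∨ m = p + 3 then [m] else []) ++ midsA m (n :: rest)
  | _, _ => []

-- B's run-splitting as a structural recursion: s is the run under construction
def glue : List Int → List Int → List (List Int)
  | s, [] => [s]
  | s, y :: ys => if y - s.getLastD 0 = 3 then s :: glue [y] ys else glue (s ++ [y]) ys
termination_by _ ys => ys.length
decreasing_by all_goals simp

-- what B's emit loop appends for the tail segments (every segment non-first)
def tailEmit : List (List Int) → List Int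
  | [] => []
  | [s] => if s.length = 1 then [] else [s.headD 0]
  | s :: g :: G => (if s.length = 1 then [s.headD 0] else [s.headD 0, s.getLastD 0]) ++ tailEmit (g :: G)

-- what B's emit loop appends from position k on, with the global `last` index fixed
def emitK (last : Int) : Int → List (List Int) → List Int
  | _, [] => []
  | k, s :: G =>
    (if s.length = 1 then (if 0 < k ∧ k < last then [s.headD 0] else [])
     else (if 0 < k then [s.headD 0] else []) ++ (if k < last then [s.getLastD 0] else []))
    ++ emitK last (k + 1) G

lemma midsA_short (p : Int) (ys : List Int) (h : ys.length ≤ 1) : midsA p ys = [] := by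
  match ys with
  | [] => simp [midsA]
  | [x] => simp [midsA]
  | x :: y :: t => simp at h

lemma glue_ne_nil (ys : List Int) : ∀ s : List Int, glue s ys ≠ [] := by
  induction ys with
  | nil => intro s; simp [glue]
  | cons y ys ih =>
    intro s
    rw [glue]
    split
    · simp
    · exact ih _

lemma glue_length_pos (ys s : List Int) : 0 < (glue s ys).length :=
  List.length_pos_of_ne_nil (glue_ne_nil ys s)

lemma a_fold (a : List Int) : ∀ (fuel j : Nat) (acc : List Int), a.length ≤ j + fuel → 1 ≤ j →
    (PySem.List.pyRange (j : Int) ((a.length : Int) - 1) 1).foldl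
      (fun acc i =>
        if (PySem.List.pyGet? a i).getD 0 = (PySem.List.pyGet? a (i + 1)).getD 0 - 3 then
          acc ++ [(PySem.List.pyGet? a i).getD 0]
        else if (PySem.List.pyGet? a i).getD 0 = (PySem.List.pyGet? a (i - 1)).getD 0 + 3 then
          acc ++ [(PySem.List.pyGet? a i).getD 0]
        else acc) acc
    = acc ++ midsA (a.getD (j - 1) 0) (a.drop j) := by
  intro fuel
  induction fuel with
  | zero =>
    intro j acc hle hj
    rw [PySem.List.pyRange_one_eq_nil (by omega), List.foldl_nil,
      List.drop_of_length_le (by omega), midsA_short _ _ (by simp)]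
    simp
  | succ fuel ih =>
    intro j acc hle hj
    by_cases hlt : (j : Int) < (a.length : Int) - 1
    · have hj1 : j + 1 < a.length := by omega
      have hj0 : j < a.length := by omega
      have hjm : j - 1 < a.length := by omega
      rw [PySem.List.pyRange_one_cons hlt, List.foldl_cons]
      have g0 : PySem.List.pyGet? a (j : Int) = some a[j] := by
        rw [PySem.List.pyGet?_natCast, List.getElem?_eq_getElem hj0]
      have g1 : PySem.List.pyGet? a ((j : Int) + 1) = some a[j + 1] := by
        rw [show ((j : Int) + 1) = ((j + 1 : Nat) : Int) by push_cast; ring,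
          PySem.List.pyGet?_natCast, List.getElem?_eq_getElem hj1]
      have g2 : PySem.List.pyGet? a ((j : Int) - 1) = some a[j - 1] := by
        rw [show ((j : Int) - 1) = ((j - 1 : Nat) : Int) by push_cast [hj]; ring,
          PySem.List.pyGet?_natCast, List.getElem?_eq_getElem hjm]
      rw [g0, g1, g2]
      have hdj : a.drop j = a[j] :: a.drop (j + 1) := List.drop_eq_getElem_cons hj0
      have hdj1 : a.drop (j + 1) = a[j + 1] :: a.drop (j + 2) := List.drop_eq_getElem_cons hj1
      have hgd : a.getD (j - 1) 0 = a[j - 1] := List.getD_eq_getElem a 0 hjm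
      have hgd2 : a.getD j 0 = a[j] := List.getD_eq_getElem a 0 hj0
      have ih' := ih (j + 1)
        (if a[j] = a[j + 1] - 3 then acc ++ [a[j]]
         else if a[j] = a[j - 1] + 3 then acc ++ [a[j]] else acc)
        (by omega) (by omega)
      rw [show ((j : Int) + 1) = (((j + 1 : Nat)) : Int) by push_cast; ring]
      simp only [Option.getD_some]
      rw [ih', hdj, hdj1, show j + 1 - 1 = j from rfl, hgd2, hgd]
      rw [midsA, ← hdj1]
      by_cases c1 : a[j] = a[j + 1] - 3
      · rw [if_pos c1, if_pos (Or.inl c1)]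
        simp
      · rw [if_neg c1]
        by_cases c2 : a[j] = a[j - 1] + 3
        · rw [if_pos c2, if_pos (Or.inr c2)]
          simp
        · rw [if_neg c2, if_neg (by rintro (h | h) <;> [exact c1 h; exact c2 h])]
          simp
    · rw [PySem.List.pyRange_one_eq_nil (by omega), List.foldl_nil,
        midsA_short _ _ (by simp; omega)]
      simp

lemma glue_fold (ys : List Int) : ∀ (S : List (List Int)) (s : List Int),
    ys.foldl
      (fun segs cur =>
        if cur - (PySem.List.pyGet? ((PySem.List.pyGet? segs (-1)).getD []) (-1)).getD 0 = 3 then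
          segs ++ [[cur]]
        else
          segs.dropLast ++ [((PySem.List.pyGet? segs (-1)).getD []) ++ [cur]])
      (S ++ [s])
    = S ++ glue s ys := by
  induction ys with
  | nil => intro S s; simp [glue]
  | cons y ys ih =>
    intro S s
    rw [List.foldl_cons, glue]
    have hlast : PySem.List.pyGet? (S ++ [s]) (-1) = some s := by
      rw [PySem.List.pyGet?_neg_one, List.getLast?_concat]
    have hdrop : (S ++ [s]).dropLast = S := List.dropLast_concat
    rw [hlast]
    simp only [Option.getD_some]
    rw [hdrop]
    have hs : (PySem.List.pyGet? s (-1)).getD 0 = s.getLastD 0 := by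
      rw [PySem.List.pyGet?_neg_one, List.getLastD_eq_getLast?]
    rw [hs]
    by_cases h : y - s.getLastD 0 = 3
    · rw [if_pos h, if_pos h, ih (S ++ [s]) [y]]
      simp
    · rw [if_neg h, if_neg h, ih S (s ++ [y])]

lemma emit_fold (last : Int) (G : List (List Int)) : ∀ (k : Int) (acc : List Int),
    (PySem.List.enumerate G k).foldl
      (fun acc ks =>
        if ks.2.length = 1 then
          (if 0 < ks.1 ∧ ks.1 < last then acc ++ [(PySem.List.pyGet? ks.2 0).getD 0] else acc)
        else
          (let acc2 := if 0 < ks.1 then acc ++ [(PySem.List.pyGet? ks.2 0).getD 0] else acc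
           if ks.1 < last then acc2 ++ [(PySem.List.pyGet? ks.2 (-1)).getD 0] else acc2))
      acc
    = acc ++ emitK last k G := by
  induction G with
  | nil => intro k acc; simp [PySem.List.enumerate_nil, emitK]
  | cons s G ih =>
    intro k acc
    rw [PySem.List.enumerate_cons, List.foldl_cons, ih (k + 1), emitK, ← List.append_assoc]
    congr 1
    dsimp only
    have h0 : (PySem.List.pyGet? s 0).getD 0 = s.headD 0 := by
      rw [PySem.List.pyGet?_zero]
      cases s <;> simp
    have h1 : (PySem.List.pyGet? s (-1)).getD 0 = s.getLastD 0 := by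
      rw [PySem.List.pyGet?_neg_one, List.getLastD_eq_getLast?]
    by_cases hl : s.length = 1 <;> by_cases hk0 : 0 < k <;> by_cases hkl : k < last <;>
      (simp [hl, hk0, hkl, h0, h1]
       try cases s with
       | nil => simp at hl
       | cons a t => simp)

lemma emitK_tail (G : List (List Int)) : ∀ (k last : Int), 1 ≤ k → last = k + (G.length : Int) - 1 →
    emitK last k G = tailEmit G := by
  induction G with
  | nil => intro k last _ _; rw [emitK, tailEmit]
  | cons s G ih =>
    intro k last hk hlast
    match G with
    | [] =>
      rw [emitK, emitK, tailEmit]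
      simp at hlast
      have hkl : ¬ k < last := by omega
      by_cases hl : s.length = 1 <;>
        simp [hl, hkl, show (0:Int) < k by omega]
    | g :: G' =>
      rw [emitK, tailEmit, ih (k + 1) last (by omega) (by simp at hlast ⊢; omega)]
      have hkl : k < last := by simp at hlast; omega
      by_cases hl : s.length = 1 <;>
        simp [hl, hkl, show (0:Int) < k by omega]

lemma tail_glue (ys : List Int) : ∀ (c : Int) (cs : List Int),
    tailEmit (glue (c :: cs) ys) =
      (if cs = [] ∧ ys = [] then [] else [c])
      ++ (match ys with
          | [] => []
          | y :: _ => if cs ≠ [] ∧ y = (c :: cs).getLastD 0 + 3 then [(c :: cs).getLastD 0] else [])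
      ++ midsA ((c :: cs).getLastD 0) ys := by
  induction ys with
  | nil => intro c cs; cases cs <;> simp [glue, tailEmit, midsA]
  | cons y ys ih =>
    intro c cs
    rw [glue]
    by_cases h : y - (c :: cs).getLastD 0 = 3
    · rw [if_pos h]
      obtain ⟨g, G', hG⟩ : ∃ g G', glue [y] ys = g :: G' := by
        cases hgl : glue [y] ys with
        | nil => exact absurd hgl (glue_ne_nil ys [y])
        | cons g G' => exact ⟨g, G', rfl⟩
      rw [hG, tailEmit, ← hG, ih y []]
      cases cs with
      | nil =>
        have h' : y = c + 3 := by simp at h; omega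
        cases ys with
        | nil => simp [midsA]
        | cons n rest =>
          simp only [midsA]
          rw [if_pos (Or.inr (show y = [c].getLastD 0 + 3 by simpa using h'))]
          simp
      | cons c2 cs' =>
        have h' : y = (c :: c2 :: cs').getLastD 0 + 3 := by omega
        cases ys with
        | nil => simp [midsA, h']
        | cons n rest =>
          simp only [midsA]
          rw [if_pos (Or.inr h')]
          simp [h']
    · rw [if_neg h]
      rw [show (c :: cs) ++ [y] = c :: (cs ++ [y]) from rfl, ih c (cs ++ [y])]
      have hlast : (c :: (cs ++ [y])).getLastD 0 = y := by
        rw [show c :: (cs ++ [y]) = (c :: cs) ++ [y] from rfl, List.getLastD_concat]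
      rw [hlast]
      have h3 : ¬ y = (c :: cs).getLast?.getD 0 + 3 := by
        rw [← List.getLastD_eq_getLast?]; omega
      cases ys with
      | nil => simp [midsA, h3]
      | cons n rest =>
        have hc : ¬ (cs ≠ [] ∧ y = (c :: cs).getLastD 0 + 3) := by
          rintro ⟨-, h2⟩; omega
        by_cases h2 : y = n - 3
        · simp [midsA, h3, if_pos (show n = y + 3 by omega)]
          simp [h2]
        · simp [midsA, h3, h2, if_neg (show ¬ n = y + 3 by omega)]

lemma head_glue (ys : List Int) : ∀ (c : Int) (cs : List Int),
    emitK (((glue (c :: cs) ys).length : Int) - 1) 0 (glue (c :: cs) ys) =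
      (match ys with
       | [] => []
       | y :: _ => if cs ≠ [] ∧ y = (c :: cs).getLastD 0 + 3 then [(c :: cs).getLastD 0] else [])
      ++ midsA ((c :: cs).getLastD 0) ys := by
  induction ys with
  | nil => intro c cs; cases cs <;> simp [glue, emitK, midsA]
  | cons y ys ih =>
    intro c cs
    rw [glue]
    by_cases h : y - (c :: cs).getLastD 0 = 3
    · rw [if_pos h]
      have hpos : 0 < ((glue [y] ys).length : Int) := by
        have := glue_ne_nil ys [y]
        cases hgl : glue [y] ys with
        | nil => exact absurd hgl this
        | cons g G' => simp
      rw [emitK,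
        emitK_tail (glue [y] ys) (0 + 1) ((((c :: cs) :: glue [y] ys).length : Int) - 1)
          (by omega) (by push_cast [List.length_cons]; ring),
        tail_glue ys y []]
      have hlt : (0 : Int) < (((c :: cs) :: glue [y] ys).length : Int) - 1 := by
        push_cast [List.length_cons]; omega
      cases cs with
      | nil =>
        have h' : y = c + 3 := by simp at h; omega
        cases ys with
        | nil => simp [midsA]
        | cons n rest =>
          simp only [midsA]
          rw [if_pos (Or.inr (show y = [c].getLastD 0 + 3 by simpa using h'))]
          simp
      | cons c2 cs' =>
        have h' : y = (c :: c2 :: cs').getLastD 0 + 3 := by omega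
        cases ys with
        | nil => simp [midsA, h', glue_ne_nil]
        | cons n rest =>
          simp only [midsA]
          rw [if_pos (Or.inr h')]
          simp [h', glue_length_pos]
    · rw [if_neg h]
      rw [show (c :: cs) ++ [y] = c :: (cs ++ [y]) from rfl, ih c (cs ++ [y])]
      have hlast : (c :: (cs ++ [y])).getLastD 0 = y := by
        rw [show c :: (cs ++ [y]) = (c :: cs) ++ [y] from rfl, List.getLastD_concat]
      rw [hlast]
      have h3 : ¬ y = (c :: cs).getLast?.getD 0 + 3 := by
        rw [← List.getLastD_eq_getLast?]; omega
      cases ys with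
      | nil => simp [midsA, h3]
      | cons n rest =>
        have hc : ¬ (cs ≠ [] ∧ y = (c :: cs).getLastD 0 + 3) := by
          rintro ⟨-, h2⟩; omega
        by_cases h2 : y = n - 3
        · simp [midsA, h3, if_pos (show n = y + 3 by omega)]
          simp [h2]
        · simp [midsA, h3, h2, if_neg (show ¬ n = y + 3 by omega)]

-- ===== VERDICT (by name: the statement is the Claim_ definition above) =====
theorem FindNecessary_spec : Claim_equal_FindNecessary := by
  intro adapters _ _
  unfold Spec_FindNecessary FindNecessary FindNecessary_alt
  simp only []
  congr 1
  set a := PySem.List.sorted adapters (fun x => x) false with ha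
  set g0 := (PySem.List.pyGet? a 0).getD 0 with hg0
  set gl := (PySem.List.pyGet? a (-1)).getD 0 with hgl
  have hA := a_fold a a.length 1 [g0, gl] (by omega) (by omega)
  rw [Nat.cast_one] at hA
  rw [hA]
  have hB := glue_fold (PySem.List.slice a (some 1) none) [] [g0]
  rw [List.nil_append] at hB
  rw [hB, List.nil_append, emit_fold, head_glue]
  have h1 : a.getD 0 0 = g0 := by
    rw [hg0, PySem.List.pyGet?_zero, List.getD_eq_getElem?_getD]
  have h2 : PySem.List.slice a (some 1) none = a.drop 1 := by
    rw [PySem.List.slice_from_one, ← List.drop_one]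
  have h3 : ([g0] : List Int).getLastD 0 = g0 := rfl
  rw [h1, h2, h3]
  congr 1
  cases a.drop 1 with
  | nil => simp
  | cons y t => simp
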